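-- pv_equiv track=rewrite | github.com/jessesec2000/Module9 | module9.py | execute_cycle
-- ===== SOURCE A (Python) =====
-- import itertools
--
-- def execute_cycle(thing_to_cycle, max_cycle_iterations):
--     result = []
--     count = 0
--     for i in itertools.cycle(thing_to_cycle):
--         if count > max_cycle_iterations:
--             break
--         else:
--             result.append(i)
--             count += 1
--     return result
-- ===== SOURCE B (Python) =====
-- def execute_cycle(thing_to_cycle, max_cycle_iterations):
--     items = list(thing_to_cycle)
--     n = max_cycle_iterations + 1
--     if not items or n <= 0:
--         return []
--     q, r = divmod(n, len(items))
--     return items * q + items[:r]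
-- ===== Notes on version B (the rewrite author's own statement) =====
-- stated objective: simpler
-- what changed: Replaces the itertools.cycle loop with a per-element counter by a closed-form computation: divmod(n, len) then bulk list repetition plus a slice.
import Mathlib
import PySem

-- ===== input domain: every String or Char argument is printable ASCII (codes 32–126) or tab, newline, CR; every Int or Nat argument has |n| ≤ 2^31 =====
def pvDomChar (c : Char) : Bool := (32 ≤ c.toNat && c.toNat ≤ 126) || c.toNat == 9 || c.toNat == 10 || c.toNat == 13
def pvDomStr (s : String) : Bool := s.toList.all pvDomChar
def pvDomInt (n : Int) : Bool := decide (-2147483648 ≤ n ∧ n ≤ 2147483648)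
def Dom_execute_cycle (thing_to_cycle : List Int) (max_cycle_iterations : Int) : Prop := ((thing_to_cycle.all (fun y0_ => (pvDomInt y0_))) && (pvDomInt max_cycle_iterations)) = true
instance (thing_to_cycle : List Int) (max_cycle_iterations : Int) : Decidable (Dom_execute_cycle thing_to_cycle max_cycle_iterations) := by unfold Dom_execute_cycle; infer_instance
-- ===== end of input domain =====

-- B replaces A's itertools.cycle loop with a closed form (divmod, bulk repetition and a slice); objective: simpler.

-- ===== PORT A =====
-- the `for i in itertools.cycle(thing_to_cycle)` loop: `cur` is the rest of the
-- current pass of the cycle iterator, refilled from `orig` when exhausted;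
-- an empty `orig` yields no elements (the loop body never runs).
def pvCycGo (orig : List Int) (m : Int) (cur : List Int) (count : Int) (acc : List Int) : List Int :=
  if count > m then acc
  else
    match (if cur = [] then orig else cur) with
    | [] => acc
    | x :: rest => pvCycGo orig m rest (count + 1) (acc ++ [x])
termination_by (m + 1 - count).toNat
decreasing_by simp_wf; omega

def execute_cycle (thing_to_cycle : List Int) (max_cycle_iterations : Int) : List Int :=
  pvCycGo thing_to_cycle max_cycle_iterations thing_to_cycle 0 []

-- ===== PORT B =====
def execute_cycle_alt (thing_to_cycle : List Int) (max_cycle_iterations : Int) : List Int :=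
  let n := max_cycle_iterations + 1
  if thing_to_cycle = [] ∨ n ≤ 0 then []
  else
    let q := PySem.Int.floordiv n thing_to_cycle.length
    let r := PySem.Int.mod n thing_to_cycle.length
    (List.replicate q.toNat thing_to_cycle).flatten ++ PySem.List.slice thing_to_cycle none (some r)

-- ===== PRECONDITION & SPEC =====
def Spec_execute_cycle (thing_to_cycle : List Int) (max_cycle_iterations : Int) (out : List Int) : Prop := out = execute_cycle_alt thing_to_cycle max_cycle_iterations
instance (thing_to_cycle : List Int) (max_cycle_iterations : Int) (out : List Int) : Decidable (Spec_execute_cycle thing_to_cycle max_cycle_iterations out) := by unfold Spec_execute_cycle; infer_instance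

-- ===== CLAIM (what is proved, stated in full; the proofs are below) =====
def Claim_equal_execute_cycle : Prop := ∀ (thing_to_cycle : List Int) (max_cycle_iterations : Int), Dom_execute_cycle thing_to_cycle max_cycle_iterations → Spec_execute_cycle thing_to_cycle max_cycle_iterations (execute_cycle thing_to_cycle max_cycle_iterations)

-- ===== LEMMAS AND PROOFS =====

-- specification function: first k elements of the cycle of `orig`, starting mid-pass at `cur`
def pvCyc (orig : List Int) : List Int → Nat → List Int
  | _, 0 => []
  | cur, k+1 =>
    match (if cur = [] then orig else cur) with
    | [] => []
    | x :: rest => x :: pvCyc orig rest k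

theorem pvCycGo_eq_cyc (orig : List Int) (m : Int) :
    ∀ (k : Nat) (cur : List Int) (count : Int) (acc : List Int),
      (m + 1 - count).toNat = k →
      pvCycGo orig m cur count acc = acc ++ pvCyc orig cur k := by
  intro k
  induction k with
  | zero =>
    intro cur count acc hk
    rw [pvCycGo]
    have : count > m := by omega
    simp [this, pvCyc]
  | succ k ih =>
    intro cur count acc hk
    have hle : ¬ count > m := by omega
    rw [pvCycGo]
    simp only [hle, if_false]
    rcases h : (if cur = [] then orig else cur) with _ | ⟨x, rest⟩
    · simp [pvCyc, h]
    · show pvCycGo orig m rest (count + 1) (acc ++ [x]) = _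
      rw [ih rest (count + 1) (acc ++ [x]) (by omega)]
      simp [pvCyc, h]

theorem pvCyc_nil (k : Nat) : pvCyc [] [] k = [] := by
  cases k <;> rfl

theorem pvCyc_take (orig : List Int) (horig : orig ≠ []) :
    ∀ (k : Nat) (cur : List Int) (K : Nat),
      k ≤ cur.length + K * orig.length →
      pvCyc orig cur k = List.take k (cur ++ (List.replicate K orig).flatten) := by
  intro k
  induction k with
  | zero => intro cur K _; simp [pvCyc]
  | succ k ih =>
    intro cur K hb
    have hlen : 1 ≤ orig.length := by
      cases orig with
      | nil => exact absurd rfl horig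
      | cons a l => simp
    obtain ⟨x, rest, rfl⟩ : ∃ x rest, orig = x :: rest := by
      cases orig with
      | nil => exact absurd rfl horig
      | cons a l => exact ⟨a, l, rfl⟩
    cases cur with
    | nil =>
      -- refill: take the head of orig
      have hK : ∃ K', K = K' + 1 := by
        rcases K with _ | K'
        · simp at hb
        · exact ⟨K', rfl⟩
      obtain ⟨K', rfl⟩ := hK
      have hmul : (K' + 1) * (x :: rest).length = K' * (x :: rest).length + (x :: rest).length :=
        Nat.succ_mul _ _
      show x :: pvCyc (x :: rest) rest k = _
      rw [ih rest K' (by simp at hb hmul ⊢; omega)]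
      rw [List.replicate_succ, List.flatten_cons]
      simp
    | cons y ys =>
      rw [pvCyc]
      have hys : (y :: ys : List Int) ≠ [] := by simp
      simp only [if_neg hys]
      rw [ih ys K (by simp at hb ⊢; omega)]
      simp

theorem take_flatten_replicate (xs : List Int) (Q R : Nat) (hR : R ≤ xs.length) :
    List.take (Q * xs.length + R) ((List.replicate (Q + 2) xs).flatten)
      = (List.replicate Q xs).flatten ++ List.take R xs := by
  induction Q with
  | zero =>
    simp only [Nat.zero_mul, Nat.zero_add, List.replicate_succ, List.flatten_cons]
    rw [List.take_append]
    have h0 : R - xs.length = 0 := by omega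
    simp [h0]
  | succ Q ih =>
    have h1 : (Q + 1) * xs.length + R = xs.length + (Q * xs.length + R) := by
      rw [Nat.succ_mul]; omega
    rw [show Q + 1 + 2 = (Q + 2) + 1 by omega]
    rw [List.replicate_succ, List.flatten_cons, h1]
    rw [List.take_append]
    have e1 : List.take (xs.length + (Q * xs.length + R)) xs = xs :=
      List.take_of_length_le (Nat.le_add_right _ _)
    have e2 : xs.length + (Q * xs.length + R) - xs.length = Q * xs.length + R :=
      Nat.add_sub_cancel_left _ _
    rw [e1, e2, ih]
    simp [List.replicate_succ]

-- ===== VERDICT (by name: the statement is the Claim_ definition above) =====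
theorem execute_cycle_spec : Claim_equal_execute_cycle := by
  intro xs m _
  unfold Spec_execute_cycle execute_cycle execute_cycle_alt
  rw [pvCycGo_eq_cyc xs m (m + 1 - 0).toNat xs 0 [] rfl]
  simp only [List.nil_append, Int.sub_zero]
  by_cases hxs : xs = []
  · subst hxs
    simp [pvCyc_nil]
  · by_cases hn : m + 1 ≤ 0
    · have : (m + 1).toNat = 0 := by omega
      rw [this]
      simp [pvCyc, hxs, hn]
    · -- main case: xs ≠ [], n = m + 1 ≥ 1
      simp only [hxs, hn, or_self, if_false]
      set n : Int := m + 1 with hn_def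
      have hlen : 0 < (xs.length : Int) := by
        cases xs with
        | nil => exact absurd rfl hxs
        | cons a l => simp
      set q : Int := PySem.Int.floordiv n xs.length with hq_def
      set r : Int := PySem.Int.mod n xs.length with hr_def
      have hr0 : 0 ≤ r := PySem.Int.mod_nonneg n hlen
      have hrlt : r < xs.length := PySem.Int.mod_lt n hlen
      have hq0 : 0 ≤ q := by
        rw [hq_def]
        exact (PySem.Int.le_floordiv_iff_mul_le hlen).mpr (by omega)
      have hsum : q * xs.length + r = n := PySem.Int.floordiv_mul_add_mod n xs.length
      set Q : Nat := q.toNat with hQ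
      set R : Nat := r.toNat with hR
      have hqc : (Q : Int) = q := Int.toNat_of_nonneg hq0
      have hrc : (R : Int) = r := Int.toNat_of_nonneg hr0
      have hnNat : n.toNat = Q * xs.length + R := by
        have : ((Q * xs.length + R : Nat) : Int) = n := by
          push_cast
          rw [hqc, hrc]; exact hsum
        omega
      have hRle : R ≤ xs.length := by omega
      rw [pvCyc_take xs hxs n.toNat xs (Q + 1) (by
        rw [hnNat]
        have : (Q + 1) * xs.length = Q * xs.length + xs.length := by ring
        omega)]
      have hslice : PySem.List.slice xs none (some r) = List.take R xs := by
        rw [PySem.List.slice_to xs hr0]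
      rw [hslice, hnNat]
      have hflat : (List.replicate (Q + 2) xs).flatten = xs ++ (List.replicate (Q + 1) xs).flatten := by
        rw [show (Q + 2) = (Q + 1) + 1 from rfl, List.replicate_succ, List.flatten_cons]
      rw [← hflat]
      exact take_flatten_replicate xs Q R hRle
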